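-- pv_equiv track=rewrite | github.com/Temirlaaan/09.09.2025---z-n | app.py | _get_primary_ip
-- ===== SOURCE A (Python) =====
-- from typing import Dict, List, Optional, Any
--
-- def _get_primary_ip(interfaces: List[Dict]) -> Optional[str]:
--     """Get primary IP from interfaces"""
--     # Look for Agent interface
--     for interface in interfaces:
--         if interface.get('type') == '1':  # Agent
--             ip = interface.get('ip', '')
--             if ip and ip not in ['0.0.0.0', '127.0.0.1', '']:
--                 return ip
--
--     # Fallback to any valid IP
--     for interface in interfaces:
--         ip = interface.get('ip', '')
--         if ip and ip not in ['0.0.0.0', '127.0.0.1', '']: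
--             return ip
--
--     return None
-- ===== SOURCE B (Python) =====
-- from typing import Dict, List, Optional
--
-- def _get_primary_ip(interfaces: List[Dict]) -> Optional[str]:
--     """Get primary IP from interfaces (single pass with fallback)."""
--     fallback = None
--     for interface in interfaces:
--         ip = interface.get('ip', '')
--         valid = bool(ip) and ip not in ['0.0.0.0', '127.0.0.1', '']
--         if interface.get('type') == '1' and valid:
--             return ip
--         if valid and fallback is None:
--             fallback = ip
--     return fallback
-- ===== Notes on version B (the rewrite author's own statement) =====
-- stated objective: simpler
-- what changed: Replaced A's two sequential scans (agent pass, then fallback pass) by a single loop that returns an agent IP immediately and tracks the first valid non-agent candidate in a fallback variable.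
import Mathlib
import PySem

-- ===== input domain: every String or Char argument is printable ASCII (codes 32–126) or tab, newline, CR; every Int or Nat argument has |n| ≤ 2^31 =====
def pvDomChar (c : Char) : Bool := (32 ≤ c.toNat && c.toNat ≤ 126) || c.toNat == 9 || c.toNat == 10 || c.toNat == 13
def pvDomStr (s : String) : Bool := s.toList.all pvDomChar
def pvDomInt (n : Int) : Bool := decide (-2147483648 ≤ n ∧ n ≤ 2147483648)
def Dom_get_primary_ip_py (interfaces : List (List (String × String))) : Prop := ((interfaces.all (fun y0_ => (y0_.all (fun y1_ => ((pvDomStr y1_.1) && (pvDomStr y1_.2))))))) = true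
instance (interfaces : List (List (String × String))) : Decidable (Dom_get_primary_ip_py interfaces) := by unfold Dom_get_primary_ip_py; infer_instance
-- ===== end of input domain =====

-- B replaces A's two sequential scans by a single pass that returns an agent IP
-- immediately and keeps the first other valid IP as a fallback (objective: simpler).


-- ===== PORT A =====
-- ip and ip not in ['0.0.0.0', '127.0.0.1', '']
def pvValidIp (ip : String) : Bool :=
  ip ≠ "" && !(ip == "0.0.0.0" || ip == "127.0.0.1" || ip == "")

-- first loop: look for Agent interface
def pvAgentPass : List (List (String × String)) → Option String
  | [] => none
  | i :: rest =>
    if (PySem.Dict.mk i).get? "type" == some "1" then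
      let ip := (PySem.Dict.mk i).getD "ip" ""
      if pvValidIp ip then some ip else pvAgentPass rest
    else pvAgentPass rest

-- second loop: fallback to any valid IP
def pvFallbackPass : List (List (String × String)) → Option String
  | [] => none
  | i :: rest =>
    let ip := (PySem.Dict.mk i).getD "ip" ""
    if pvValidIp ip then some ip else pvFallbackPass rest

def get_primary_ip_py (interfaces : List (List (String × String))) : Option String :=
  match pvAgentPass interfaces with
  | some ip => some ip
  | none => pvFallbackPass interfaces

-- ===== PORT B =====
def pvOnePass : List (List (String × String)) → Option String → Option String
  | [], fallback => fallback
  | i :: rest, fallback =>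
    let ip := (PySem.Dict.mk i).getD "ip" ""
    let valid := pvValidIp ip
    if (PySem.Dict.mk i).get? "type" == some "1" && valid then some ip
    else pvOnePass rest (if valid && fallback.isNone then some ip else fallback)

def get_primary_ip_py_alt (interfaces : List (List (String × String))) : Option String :=
  pvOnePass interfaces none

-- ===== PRECONDITION & SPEC =====
def Spec_get_primary_ip_py (interfaces : List (List (String × String))) (out : Option String) : Prop := out = get_primary_ip_py_alt interfaces
instance (interfaces : List (List (String × String))) (out : Option String) : Decidable (Spec_get_primary_ip_py interfaces out) := by unfold Spec_get_primary_ip_py; infer_instance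

-- ===== CLAIM (what is proved, stated in full; the proofs are below) =====
def Claim_equal_get_primary_ip_py : Prop := ∀ (interfaces : List (List (String × String))), Dom_get_primary_ip_py interfaces → Spec_get_primary_ip_py interfaces (get_primary_ip_py interfaces)

-- ===== LEMMAS AND PROOFS =====
-- Invariant of the single pass: an agent hit in the suffix wins; otherwise the
-- already-recorded fallback; otherwise the first valid IP of the suffix.
theorem pvOnePass_eq (is : List (List (String × String))) :
    ∀ fb : Option String, pvOnePass is fb =
      match pvAgentPass is with
      | some ip => some ip
      | none => match fb with
        | some f => some f
        | none => pvFallbackPass is := by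
  induction is with
  | nil => intro fb; cases fb <;> rfl
  | cons i rest ih =>
    intro fb
    simp only [pvOnePass, pvAgentPass, pvFallbackPass]
    by_cases ht : ((PySem.Dict.mk i).get? "type" == some "1") = true <;>
      by_cases hv : pvValidIp ((PySem.Dict.mk i).getD "ip" "") = true <;>
        cases fb <;>
          simp [ht, hv, ih]

theorem get_primary_ip_py_spec : Claim_equal_get_primary_ip_py := by
  intro interfaces _
  unfold Spec_get_primary_ip_py get_primary_ip_py get_primary_ip_py_alt
  rw [pvOnePass_eq]
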